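-- pv_equiv track=rewrite | github.com/Vaiom/BL_textBasedAdventure | utility.py | lim
-- ===== SOURCE A (Python) =====
-- def lim(text, length=39):
--     """
--     Slices strings so that each line
--     is underneath the character limit.
--     """
--     # If given text is a string.
--     if type(text) == str:
--         # If string is underneath character limit, return the string.
--         if len(text) <= length:
--             return text
--         # If string does not contain spaces.
--         elif " " not in text or text.find(" ") >= length:
--             raise Exception("Not Splitable")
--         # Convert the string to a list.
--         else:
--             text = [text]
--             master = text
--     # If given text is a list.
--     elif type(text) == list:
--         # Stores text as a new list to be modified.
--         master = text
--         # Checks if last string is underneath character limit.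
--         if len(text[-1]) <= length:
--             x = "\n".join(text)
--             return x
--     # The line below is for checking indents (unavailable).
--     # temp = text[0]
--     # Left half of string.
--     left = text[-1]
--     # Right half of string.
--     right = text[-1]
--     # Shortens left string to length and most right ' '.
--     left = left[:length]
--     ind = left.rfind(" ")
--     # Shortens left string to ' '.
--     left = left[:ind]
--     # Expands right string to ' '.
--     right = right[ind+1:]
--     # Adds the two spliced strings to the list.
--     master.pop()
--     master.append(left)
--     master.append(right)
--     # Recursion until desired result is reached.
--     return (lim(master, length))
-- ===== SOURCE B (Python) =====
-- def lim(text, length=39):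
--     """
--     Iterative greedy word-wrap: each line is cut at the last space
--     inside the length limit; lines are collected and joined once.
--     """
--     if len(text) <= length:
--         return text
--     if " " not in text or text.find(" ") >= length:
--         raise Exception("Not Splitable")
--     lines = []
--     rest = text
--     while len(rest) > length:
--         window = rest[:length]
--         cut = window.rfind(" ")
--         if cut == -1:
--             raise Exception("Not Splitable")
--         lines.append(window[:cut])
--         rest = rest[cut + 1:]
--     lines.append(rest)
--     return "\n".join(lines)
-- ===== Notes on version B (the rewrite author's own statement) =====
-- stated objective: simpler
-- what changed: Replaces A's self-recursion on a shared mutated list (with its str/list type dispatch and re-joining check at every call) by a plain iterative while-loop that accumulates finished lines and a remainder string and joins once at the end; the list-argument protocol A uses only to recurse is dropped, and B raises Not Splitable instead of recursing forever when a line has no space inside the limit.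
import Mathlib
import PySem

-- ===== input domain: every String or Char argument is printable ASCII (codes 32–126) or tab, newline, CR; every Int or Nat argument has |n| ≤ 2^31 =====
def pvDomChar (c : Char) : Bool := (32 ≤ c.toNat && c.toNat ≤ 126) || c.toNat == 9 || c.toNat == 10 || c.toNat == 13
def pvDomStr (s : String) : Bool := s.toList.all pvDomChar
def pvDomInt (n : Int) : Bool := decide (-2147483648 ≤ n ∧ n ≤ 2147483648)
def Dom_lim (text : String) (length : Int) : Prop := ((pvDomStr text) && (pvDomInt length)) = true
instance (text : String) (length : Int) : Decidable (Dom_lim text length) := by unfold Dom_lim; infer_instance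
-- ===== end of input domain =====

-- B replaces A's self-recursion on a mutated shared list by a plain iterative loop
-- accumulating finished lines (objective: simpler); return-value equivalence on Pre_
-- (the ported domain is strings, so A's list-argument branch exists only inside its recursion).

-- ===== PORT A =====
-- A's recursive call `lim(master, length)` takes a LIST; that list-typed recursion is the
-- helper limList (the str branch of A builds `[text]` and falls through to the common code,
-- which limList's first step executes identically since `len(text[-1]) <= length` is false there).
-- The Nat argument is fuel, a totality guard only: where A recurses forever (until Python's
-- RecursionError) the fuel runs out and the port returns "" (a raise, outside Pre_lim).
def limList (length : Int) : Nat → List String → String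
  | 0, _ => ""                                   -- RecursionError (outside Pre_lim)
  | fuel+1, master =>
    -- if len(text[-1]) <= length: return "\n".join(text)
    if PySem.Str.len ((PySem.List.pyGet? master (-1)).getD "") ≤ length then
      PySem.Str.join "\n" master
    else
      -- left = text[-1]; right = text[-1]
      let last := (PySem.List.pyGet? master (-1)).getD ""
      -- left = left[:length]; ind = left.rfind(" ")
      let left := PySem.Str.slice last none (some length)
      let ind := PySem.Str.rfind left " "
      -- left = left[:ind]; right = right[ind+1:]
      let left2 := PySem.Str.slice left none (some ind)
      let right := PySem.Str.slice last (some (ind + 1)) none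
      -- master.pop(); master.append(left); master.append(right); return lim(master, length)
      limList length fuel (master.dropLast ++ [left2, right])

def lim (text : String) (length : Int) : String :=
  -- if len(text) <= length: return text
  if PySem.Str.len text ≤ length then text
  -- elif " " not in text or text.find(" ") >= length: raise Exception("Not Splitable")
  else if ¬ (PySem.Str.isIn " " text = true) ∨ PySem.Str.find text " " ≥ length then ""  -- raise (outside Pre_lim)
  -- else: text = [text]; master = text; … ; return lim(master, length)
  else limList length (text.toList.length + 1) [text]

-- ===== PORT B =====
-- B's while-loop: `lines` is the accumulated list, `rest` the unfinished remainder; the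
-- `some`/`none` result separates the loop's normal exit from its raise.  Fuel is a totality
-- guard only (each real iteration strictly shortens rest, so len(text)+1 never runs out
-- except where B raises via cut == -1, which returns none first anyway — see loop lemmas).
def wrapLoop (length : Int) : Nat → List String → String → Option (List String)
  | 0, _, _ => none
  | fuel+1, lines, rest =>
    -- while len(rest) > length … else: lines.append(rest)
    if PySem.Str.len rest ≤ length then some (lines ++ [rest])
    else
      -- window = rest[:length]; cut = window.rfind(" ")
      let window := PySem.Str.slice rest none (some length)
      let cut := PySem.Str.rfind window " "
      -- if cut == -1: raise Exception("Not Splitable")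
      if cut = -1 then none
      -- lines.append(window[:cut]); rest = rest[cut+1:]
      else wrapLoop length fuel (lines ++ [PySem.Str.slice window none (some cut)])
                    (PySem.Str.slice rest (some (cut + 1)) none)

def lim_alt (text : String) (length : Int) : String :=
  if PySem.Str.len text ≤ length then text
  else if ¬ (PySem.Str.isIn " " text = true) ∨ PySem.Str.find text " " ≥ length then ""  -- raise (outside Pre_lim)
  else
    match wrapLoop length (text.toList.length + 1) [] text with
    | none => ""                                  -- raise (outside Pre_lim)
    | some lines => PySem.Str.join "\n" lines     -- return "\n".join(lines)

-- ===== PRECONDITION & SPEC =====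
-- Pre_lim excludes exactly the inputs where Python A raises: strings over the limit with no
-- space before the limit (Exception "Not Splitable"), and strings containing, at a position a
-- line can start (0 or right after a space) with more than `length` characters still to go, a
-- space-free window of `length` characters — there A's ind == -1 step recurses without
-- progress until RecursionError.
def Pre_lim (text : String) (length : Int) : Prop :=
  ((text.toList.length : Int) ≤ length) ∨
  ((' ' ∈ text.toList.take length.toNat) ∧
   ∀ p < text.toList.length, ((p : Int) < (text.toList.length : Int) - length) →
     (p = 0 ∨ text.toList[p-1]? = some ' ') →
     ∃ i < text.toList.length, p ≤ i ∧ (i : Int) < (p : Int) + length ∧ text.toList[i]? = some ' ')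
instance (text : String) (length : Int) : Decidable (Pre_lim text length) := by
  unfold Pre_lim; infer_instance

def pvWitness_lim : String × Int := ("hello world foo", 6)

def Spec_lim (text : String) (length : Int) (out : String) : Prop := out = lim_alt text length
instance (text : String) (length : Int) (out : String) : Decidable (Spec_lim text length out) := by
  unfold Spec_lim; infer_instance

-- ===== CLAIM (what is proved, stated in full; the proofs are below) =====
def Claim_equal_lim : Prop := ∀ (text : String) (length : Int), Dom_lim text length → Pre_lim text length → Spec_lim text length (lim text length)

-- ===== LEMMAS AND PROOFS =====

-- s[0:] = s, on Str
lemma str_slice_zero_none (s : String) : PySem.Str.slice s (some 0) none = s := by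
  apply String.toList_inj.mp
  simp [PySem.Str.toList_slice]

-- A's stuck state: the last piece is over the limit and its window has no space; every step
-- reproduces the same last piece, so the fuel runs out and the result is "".
lemma limList_stuck (length : Int) : ∀ (fuel : Nat) (acc : List String) (rest : String),
    ¬ PySem.Str.len rest ≤ length →
    PySem.Str.rfind (PySem.Str.slice rest none (some length)) " " = -1 →
    limList length fuel (acc ++ [rest]) = "" := by
  intro fuel
  induction fuel with
  | zero => intro acc rest _ _; rfl
  | succ n ih =>
    intro acc rest hlen hind
    rw [limList]
    simp only [PySem.List.pyGet?_neg_one_append_singleton, Option.getD_some]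
    rw [if_neg hlen]
    rw [List.dropLast_concat, hind]
    have : (-1 : Int) + 1 = 0 := by norm_num
    rw [this, str_slice_zero_none]
    have hsplit : acc ++ [PySem.Str.slice (PySem.Str.slice rest none (some length)) none (some (-1)), rest]
        = (acc ++ [PySem.Str.slice (PySem.Str.slice rest none (some length)) none (some (-1))]) ++ [rest] := by
      simp
    rw [hsplit]
    exact ih _ rest hlen hind

-- Main loop correspondence: A's recursion on `acc ++ [rest]` computes exactly the join of
-- B's loop run from (acc, rest), step for step with the same fuel.
lemma limList_eq_wrapLoop (length : Int) : ∀ (fuel : Nat) (acc : List String) (rest : String),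
    limList length fuel (acc ++ [rest]) =
      (match wrapLoop length fuel acc rest with
       | none => ""
       | some lines => PySem.Str.join "\n" lines) := by
  intro fuel
  induction fuel with
  | zero => intro acc rest; rfl
  | succ n ih =>
    intro acc rest
    rw [limList, wrapLoop]
    simp only [PySem.List.pyGet?_neg_one_append_singleton, Option.getD_some]
    by_cases hlen : PySem.Str.len rest ≤ length
    · rw [if_pos hlen, if_pos hlen]
    · rw [if_neg hlen, if_neg hlen]
      by_cases hind : PySem.Str.rfind (PySem.Str.slice rest none (some length)) " " = -1
      · rw [if_pos hind]
        rw [List.dropLast_concat, hind]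
        have h0 : (-1 : Int) + 1 = 0 := by norm_num
        rw [h0, str_slice_zero_none]
        have hsplit : acc ++ [PySem.Str.slice (PySem.Str.slice rest none (some length)) none (some (-1)), rest]
            = (acc ++ [PySem.Str.slice (PySem.Str.slice rest none (some length)) none (some (-1))]) ++ [rest] := by
          simp
        rw [hsplit]
        exact limList_stuck length n _ rest hlen hind
      · rw [if_neg hind]
        rw [List.dropLast_concat]
        have hsplit : acc ++ [PySem.Str.slice (PySem.Str.slice rest none (some length)) none
              (some (PySem.Str.rfind (PySem.Str.slice rest none (some length)) " ")),
            PySem.Str.slice rest (some (PySem.Str.rfind (PySem.Str.slice rest none (some length)) " " + 1)) none]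
            = (acc ++ [PySem.Str.slice (PySem.Str.slice rest none (some length)) none
              (some (PySem.Str.rfind (PySem.Str.slice rest none (some length)) " "))]) ++
              [PySem.Str.slice rest (some (PySem.Str.rfind (PySem.Str.slice rest none (some length)) " " + 1)) none] := by
          simp
        rw [hsplit]
        exact ih _ _

-- The two ports agree on EVERY input (where A raises, both return "").
lemma lim_eq_lim_alt (text : String) (length : Int) : lim text length = lim_alt text length := by
  unfold lim lim_alt
  by_cases h1 : PySem.Str.len text ≤ length
  · rw [if_pos h1, if_pos h1]
  · rw [if_neg h1, if_neg h1]
    by_cases h2 : ¬ (PySem.Str.isIn " " text = true) ∨ PySem.Str.find text " " ≥ length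
    · rw [if_pos h2, if_pos h2]
    · rw [if_neg h2, if_neg h2]
      have := limList_eq_wrapLoop length (text.toList.length + 1) [] text
      simpa using this

-- ===== VERDICT (by name: the statement is the Claim_ definition above) =====
theorem lim_spec : Claim_equal_lim := by
  intro text length _ _
  unfold Spec_lim
  exact lim_eq_lim_alt text length
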